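-- pv_equiv track=rewrite | github.com/HsnSaboor/hadith-api-toon | scripts/convert_single_section.py | escape_val
-- ===== SOURCE A (Python) =====
-- def escape_val(value):
--     if value is None:
--         return "null"
--     s = str(value)
--     needs_quoting = any(c in s for c in [",", '"', ":", "\n", "\r"])
--     if needs_quoting:
--         s = s.replace('"', '\\"').replace("\n", "\\n").replace("\r", "\\r")
--         return f'"{s}"'
--     return s
-- ===== SOURCE B (Python) =====
-- def escape_val(value):
--     if value is None:
--         return "null"
--     s = str(value)
--     out = []
--     special = False
--     for c in s:
--         if c == '"':
--             special = True
--             out.append('\\"')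
--         elif c == '\n':
--             special = True
--             out.append('\\n')
--         elif c == '\r':
--             special = True
--             out.append('\\r')
--         else:
--             if c == ',' or c == ':':
--                 special = True
--             out.append(c)
--     if special:
--         return '"' + ''.join(out) + '"'
--     return s
-- ===== Notes on version B (the rewrite author's own statement) =====
-- stated objective: alternative
-- what changed: Replaces A's five substring-containment scans plus three whole-string replace passes with a single pass over the characters that simultaneously sets the needs-quoting flag and builds the escaped text.
import Mathlib
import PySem

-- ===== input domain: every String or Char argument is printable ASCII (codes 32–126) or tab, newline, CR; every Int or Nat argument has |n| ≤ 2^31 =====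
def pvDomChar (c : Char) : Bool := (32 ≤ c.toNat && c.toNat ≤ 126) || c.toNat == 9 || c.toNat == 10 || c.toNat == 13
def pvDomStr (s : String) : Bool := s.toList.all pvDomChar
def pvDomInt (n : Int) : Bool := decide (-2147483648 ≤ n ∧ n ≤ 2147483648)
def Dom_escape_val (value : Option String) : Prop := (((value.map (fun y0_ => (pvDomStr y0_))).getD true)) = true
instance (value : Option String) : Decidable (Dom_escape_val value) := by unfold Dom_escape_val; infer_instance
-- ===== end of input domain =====

-- B makes one pass over the characters, setting the needs-quoting flag and building the escaped
-- text simultaneously, instead of A's five containment scans plus three replace passes (alternative decomposition).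


-- ===== PORT A =====
-- str(value) on a str is the identity; 'c in s' is PySem.Chars.isIn; the three replaces are PySem.Chars.replace.
def escape_val (value : Option String) : String :=
  match value with
  | none => "null"
  | some v =>
    let s := v.toList
    let needs_quoting := [',', '"', ':', '\n', '\r'].any (fun c => PySem.Chars.isIn [c] s)
    if needs_quoting then
      let s2 := PySem.Chars.replace (PySem.Chars.replace (PySem.Chars.replace s ['"'] ['\\', '"']) ['\n'] ['\\', 'n']) ['\r'] ['\\', 'r']
      String.ofList (['"'] ++ s2 ++ ['"'])
    else v

-- ===== PORT B =====
-- the body of B's single for-loop: update (special, out) by one character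
def pvStepB (acc : Bool × List Char) (c : Char) : Bool × List Char :=
  if c == '"' then (true, acc.2 ++ ['\\', '"'])
  else if c == '\n' then (true, acc.2 ++ ['\\', 'n'])
  else if c == '\r' then (true, acc.2 ++ ['\\', 'r'])
  else ((acc.1 || (c == ',' || c == ':')), acc.2 ++ [c])

def escape_val_alt (value : Option String) : String :=
  match value with
  | none => "null"
  | some v =>
    let st := v.toList.foldl pvStepB (false, [])
    if st.1 then String.ofList (['"'] ++ st.2 ++ ['"']) else v

-- ===== PRECONDITION & SPEC =====
def Spec_escape_val (value : Option String) (out : String) : Prop := out = escape_val_alt value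
instance (value : Option String) (out : String) : Decidable (Spec_escape_val value out) := by unfold Spec_escape_val; infer_instance

-- ===== CLAIM (what is proved, stated in full; the proofs are below) =====
def Claim_equal_escape_val : Prop := ∀ (value : Option String), Dom_escape_val value → Spec_escape_val value (escape_val value)

-- ===== LEMMAS AND PROOFS =====

/-- The per-character escape map B applies. -/
def pvEsc (c : Char) : List Char :=
  if c == '"' then ['\\', '"'] else if c == '\n' then ['\\', 'n'] else if c == '\r' then ['\\', 'r'] else [c]

/-- The per-character quoting trigger. -/
def pvSpec (c : Char) : Bool := c == ',' || c == '"' || c == ':' || c == '\n' || c == '\r'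

theorem pv_foldB (l : List Char) (b : Bool) (acc : List Char) :
    l.foldl pvStepB (b, acc) = (b || l.any pvSpec, acc ++ l.flatMap pvEsc) := by
  induction l generalizing b acc with
  | nil => simp
  | cons c t ih =>
    rw [List.foldl_cons]
    by_cases h1 : c = '"'
    · rw [show pvStepB (b, acc) c = (true, acc ++ ['\\', '"']) from by simp [pvStepB, h1], ih]
      simp [h1, pvSpec, pvEsc]
    · by_cases h2 : c = '\n'
      · rw [show pvStepB (b, acc) c = (true, acc ++ ['\\', 'n']) from by simp [pvStepB, h2], ih]
        simp [h2, pvSpec, pvEsc]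
      · by_cases h3 : c = '\r'
        · rw [show pvStepB (b, acc) c = (true, acc ++ ['\\', 'r']) from by simp [pvStepB, h3], ih]
          simp [h3, pvSpec, pvEsc]
        · rw [show pvStepB (b, acc) c = (b || (c == ',' || c == ':'), acc ++ [c]) from by
            simp [pvStepB, h1, h2, h3], ih]
          have e1 : (c == '"') = false := by simp [h1]
          have e2 : (c == '\n') = false := by simp [h2]
          have e3 : (c == '\r') = false := by simp [h3]
          simp only [List.any_cons, List.flatMap_cons, pvSpec, pvEsc, e1, e2, e3, List.append_assoc, List.singleton_append, Prod.mk.injEq]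
          refine ⟨?_, rfl⟩
          cases b <;> cases hc : (c == ',') <;> cases hcol : (c == ':') <;>
            simp [Bool.or_comm]

theorem pv_replace_go_single (a : Char) (r : List Char) (l : List Char) (fuel : Nat) (acc : List Char)
    (h : l.length ≤ fuel) :
    PySem.Chars.replace.go [a] r fuel l acc = acc.reverse ++ l.flatMap (fun c => if c == a then r else [c]) := by
  induction l generalizing fuel acc with
  | nil => cases fuel <;> simp [PySem.Chars.replace.go]
  | cons c t ih =>
    cases fuel with
    | zero => simp at h
    | succ f =>
      simp only [PySem.Chars.replace.go]
      by_cases hc : c = a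
      · subst hc
        rw [if_pos (by simp [List.isPrefixOf])]
        simp only [List.length_cons, List.length_nil, List.drop_succ_cons, List.drop_zero]
        rw [ih f _ (by simpa using Nat.le_of_succ_le_succ h)]
        simp
      · rw [if_neg (by simp [List.isPrefixOf]; exact fun hh => hc hh.symm)]
        rw [ih f _ (by simpa using Nat.le_of_succ_le_succ h)]
        simp [hc]

theorem pv_replace_single (s : List Char) (a : Char) (r : List Char) :
    PySem.Chars.replace s [a] r = s.flatMap (fun c => if c == a then r else [c]) := by
  simpa [PySem.Chars.replace] using pv_replace_go_single a r s s.length [] le_rfl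

theorem pv_isIn_single (a : Char) (s : List Char) : PySem.Chars.isIn [a] s = s.contains a := by
  cases hb : s.contains a with
  | true =>
    have ha : a ∈ s := by simpa using hb
    rw [(PySem.Chars.isIn_iff_infix [a] s).2]
    obtain ⟨u, v, rfl⟩ := List.append_of_mem ha
    exact ⟨u, v, by simp⟩
  | false =>
    have ha : a ∉ s := by simpa using hb
    rw [(PySem.Chars.isIn_eq_false_iff [a] s).2]
    intro hin
    exact ha (hin.subset (by simp))

theorem pv_needs (s : List Char) :
    ([',', '"', ':', '\n', '\r'].any (fun c => PySem.Chars.isIn [c] s)) = s.any pvSpec := by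
  simp only [List.any_cons, List.any_nil, pv_isIn_single, Bool.or_false]
  rw [Bool.eq_iff_iff]
  simp only [Bool.or_eq_true, List.contains_eq_mem, List.any_eq_true, decide_eq_true_eq, pvSpec,
    Bool.or_eq_true, beq_iff_eq]
  constructor
  · rintro (h | h | h | h | h) <;> exact ⟨_, h, by simp⟩
  · rintro ⟨c, hc, h⟩
    rcases h with ((((h | h) | h) | h) | h) <;> subst h <;> simp [hc]

theorem pv_replace_chain (s : List Char) :
    PySem.Chars.replace (PySem.Chars.replace (PySem.Chars.replace s ['"'] ['\\', '"']) ['\n'] ['\\', 'n']) ['\r'] ['\\', 'r']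
    = s.flatMap pvEsc := by
  simp only [pv_replace_single, List.flatMap_assoc]
  refine List.flatMap_congr (fun c _hc => ?_)
  by_cases h1 : c = '"'
  · simp [h1, pvEsc]
  · by_cases h2 : c = '\n'
    · simp [h2, pvEsc]
    · by_cases h3 : c = '\r'
      · simp [h3, pvEsc]
      · simp [h1, h2, h3, pvEsc]

-- ===== VERDICT (by name: the statement is the Claim_ definition above) =====
theorem escape_val_spec : Claim_equal_escape_val := by
  intro value _
  unfold Spec_escape_val escape_val escape_val_alt
  cases value with
  | none => rfl
  | some v =>
    simp only [pv_foldB, Bool.false_or, List.nil_append, pv_needs, pv_replace_chain]
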